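-- pv_equiv track=rewrite | github.com/ThuanyDeSouza/N3_Security | encripta.py | base64_to_int_chunk
-- ===== SOURCE A (Python) =====
-- def base64_to_int_chunk(base64_string, n):
--   chunks = [base64_string[i:i+n] for i in range(0, len(base64_string), n)]
--   converted = []
--   result = 0
--   for chunk in chunks:
--     for c in reversed(chunk):
--       result = result * 256
--       result += ord(c)
--     converted.append(result)
--     result = 0
--
--   return converted
-- ===== SOURCE B (Python) =====
-- def base64_to_int_chunk(base64_string, n):
--   if n <= 0:
--     return []
--   out = []
--   acc = 0
--   k = 0
--   for c in base64_string:
--     acc += ord(c) << (8 * k)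
--     k += 1
--     if k == n:
--       out.append(acc)
--       acc = 0
--       k = 0
--   if k:
--     out.append(acc)
--   return out
-- ===== Notes on version B (the rewrite author's own statement) =====
-- stated objective: alternative
-- what changed: Replaces A's staged pipeline (materialise n-char slices via range, then a reverse-Horner inner loop per chunk) by one flat left-to-right pass over the characters with an (output, accumulator, position) state that flushes every n characters; no slicing, no inner loop, no reversal.
import Mathlib
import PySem

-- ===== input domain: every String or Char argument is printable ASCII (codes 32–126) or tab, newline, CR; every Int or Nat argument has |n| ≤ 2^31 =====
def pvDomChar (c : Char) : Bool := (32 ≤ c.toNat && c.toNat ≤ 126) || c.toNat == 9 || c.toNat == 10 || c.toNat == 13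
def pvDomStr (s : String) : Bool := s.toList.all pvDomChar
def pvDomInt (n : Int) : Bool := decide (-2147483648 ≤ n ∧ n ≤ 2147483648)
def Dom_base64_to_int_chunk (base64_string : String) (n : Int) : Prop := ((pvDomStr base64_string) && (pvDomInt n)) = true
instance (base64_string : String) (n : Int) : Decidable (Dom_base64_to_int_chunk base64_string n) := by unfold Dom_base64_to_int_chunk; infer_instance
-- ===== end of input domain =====

-- B replaces A's staged pipeline (slice out n-char chunks, then a reverse-Horner inner loop
-- per chunk) by one flat left-to-right pass with an (output, accumulator, position) state
-- that flushes every n characters (alternative decomposition; same cost, no speed claim).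

-- ===== PORT A =====
def base64_to_int_chunk (base64_string : String) (n : Int) : List Int :=
  let chunks := (PySem.List.pyRange 0 (PySem.Str.len base64_string) n).map
    (fun i => PySem.List.slice base64_string.toList (some i) (some (i + n)))
  (chunks.foldl
    (fun (st : List Int × Int) chunk =>
      let result := chunk.reverse.foldl (fun r c => r * 256 + (c.toNat : Int)) st.2
      (st.1 ++ [result], 0))
    ([], 0)).1

-- ===== PORT B =====
def base64_to_int_chunk_alt (base64_string : String) (n : Int) : List Int :=
  if n ≤ 0 then []
  else
    let st := base64_string.toList.foldl
      (fun (st : List Int × Int × Int) c =>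
        let acc := st.2.1 + ((c.toNat : Int) <<< ((8 * st.2.2).toNat))
        let k := st.2.2 + 1
        if k = n then (st.1 ++ [acc], (0 : Int), (0 : Int)) else (st.1, acc, k))
      ([], 0, 0)
    if st.2.2 ≠ 0 then st.1 ++ [st.2.1] else st.1

-- ===== PRECONDITION & SPEC =====
-- Pre_ excludes only n = 0, on which Python's range(0, len, 0) makes A raise ValueError.
def Pre_base64_to_int_chunk (_base64_string : String) (n : Int) : Prop := n ≠ 0
instance (base64_string : String) (n : Int) : Decidable (Pre_base64_to_int_chunk base64_string n) := by unfold Pre_base64_to_int_chunk; infer_instance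

def pvWitness_base64_to_int_chunk : String × Int := ("abc", 2)

def Spec_base64_to_int_chunk (base64_string : String) (n : Int) (out : List Int) : Prop := out = base64_to_int_chunk_alt base64_string n
instance (base64_string : String) (n : Int) (out : List Int) : Decidable (Spec_base64_to_int_chunk base64_string n out) := by unfold Spec_base64_to_int_chunk; infer_instance

-- ===== CLAIM (what is proved, stated in full; the proofs are below) =====
def Claim_equal_base64_to_int_chunk : Prop := ∀ (base64_string : String) (n : Int), Dom_base64_to_int_chunk base64_string n → Pre_base64_to_int_chunk base64_string n → Spec_base64_to_int_chunk base64_string n (base64_to_int_chunk base64_string n)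

-- ===== LEMMAS AND PROOFS =====

-- The little-endian value of a chunk (first character is least significant).
def pvVal (l : List Char) : Int := l.foldr (fun c acc => (c.toNat : Int) + 256 * acc) 0

-- The common specification: the values of the successive chunks of size m+1.
def pvChunks (m : Nat) : List Char → List Int
  | [] => []
  | c :: t => pvVal (c :: t.take m) :: pvChunks m (t.drop m)
termination_by l => l.length
decreasing_by simp

theorem pvVal_nil : pvVal [] = 0 := rfl
theorem pvChunks_nil (m : Nat) : pvChunks m [] = [] := by rw [pvChunks.eq_def]
theorem pvChunks_cons (m : Nat) (c : Char) (t : List Char) :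
    pvChunks m (c :: t) = pvVal (c :: t.take m) :: pvChunks m (t.drop m) := by
  rw [pvChunks.eq_def]
theorem pvVal_cons (c : Char) (t : List Char) : pvVal (c :: t) = (c.toNat : Int) + 256 * pvVal t := rfl

-- pyRange with positive step: nil and cons forms, and the offset-shift form.
theorem pv_pyRange_nil (a b s : Int) (hs : 0 < s) (hab : b ≤ a) :
    PySem.List.pyRange a b s = [] := by
  rw [PySem.List.pyRange_of_pos a b hs]
  simp [show ¬ a < b by omega]

theorem pv_pyRange_cons (a b s : Int) (hs : 0 < s) (hab : a < b) :
    PySem.List.pyRange a b s = a :: PySem.List.pyRange (a + s) b s := by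
  rw [PySem.List.pyRange_of_pos a b hs, PySem.List.pyRange_of_pos (a + s) b hs]
  have h1 : (b - a + s - 1) / s = (b - a - 1) / s + 1 := by
    have : b - a + s - 1 = (b - a - 1) + 1 * s := by ring
    rw [this, Int.add_mul_ediv_right _ _ (by omega : s ≠ 0)]
  have hq : 0 ≤ (b - a - 1) / s := Int.ediv_nonneg (by omega) (by omega)
  by_cases h2 : a + s < b
  · have hc : (if a < b then ((b - a + s - 1) / s).toNat else 0)
        = (if a + s < b then ((b - (a + s) + s - 1) / s).toNat else 0) + 1 := by
      rw [if_pos hab, if_pos h2, h1, show b - (a + s) + s - 1 = b - a - 1 from by ring]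
      omega
    rw [hc, List.range_succ_eq_map, List.map_cons, List.map_map]
    congr 1
    · simp
    · exact List.map_congr_left (fun k _ => by simp only [Function.comp_apply]; push_cast; ring)
  · have hz : (b - a - 1) / s = 0 := by
      apply Int.ediv_eq_zero_of_lt (by omega) (by omega)
    have hc : (if a < b then ((b - a + s - 1) / s).toNat else 0) = 1 := by
      rw [if_pos hab, h1, hz]; rfl
    rw [hc, if_neg h2]
    simp

theorem pv_pyRange_shift (c b s : Int) (hs : 0 < s) :
    PySem.List.pyRange c b s = (PySem.List.pyRange 0 (b - c) s).map (fun j => j + c) := by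
  rw [PySem.List.pyRange_of_pos c b hs, PySem.List.pyRange_of_pos 0 (b - c) hs]
  have hc : (if c < b then ((b - c + s - 1) / s).toNat else 0)
      = (if (0 : Int) < b - c then ((b - c - 0 + s - 1) / s).toNat else 0) := by
    by_cases h : c < b
    · rw [if_pos h, if_pos (by omega)]; norm_num
    · rw [if_neg h, if_neg (by omega)]
  rw [hc, List.map_map]
  exact List.map_congr_left (fun k _ => by simp; ring)

-- A's per-chunk slicing over range(0, len, m+1) computes pvChunks.
theorem pvA_chunks (m L : Nat) (l : List Char) (hl : l.length = L) :
    (PySem.List.pyRange 0 (l.length : Int) ((m : Int) + 1)).map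
      (fun j => pvVal (PySem.List.slice l (some j) (some (j + ((m : Int) + 1)))))
      = pvChunks m l := by
  induction L using Nat.strong_induction_on generalizing l with
  | _ L IH =>
    cases l with
    | nil =>
        rw [pvChunks_nil]
        simp [pv_pyRange_nil 0 0 ((m : Int) + 1) (by omega) (by omega)]
    | cons c t =>
      have hs : (0 : Int) < (m : Int) + 1 := by omega
      have hlen : ((c :: t).length : Int) = (t.length : Int) + 1 := by simp
      rw [pv_pyRange_cons 0 _ _ hs (by rw [hlen]; omega), List.map_cons]
      have hhead : pvVal (PySem.List.slice (c :: t) (some 0) (some (0 + ((m : Int) + 1))))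
          = pvVal (c :: t.take m) := by
        have h1 : (0 : Int) + ((m : Int) + 1) = ((m + 1 : Nat) : Int) := by push_cast; ring
        rw [h1, PySem.List.slice_zero_start, PySem.List.slice_to_natCast]
        simp [List.take_succ_cons]
      rw [hhead, pvChunks_cons]
      congr 1
      -- tail
      by_cases hm : m ≤ t.length
      · have hstop : ((c :: t).length : Int) - (0 + ((m : Int) + 1)) = ((t.drop m).length : Int) := by
          simp; omega
        rw [pv_pyRange_shift (0 + ((m : Int) + 1)) _ _ hs, hstop, List.map_map]
        have hL : t.length + 1 = L := by simpa using hl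
        have hrec := IH (t.drop m).length (by simp only [List.length_drop]; omega) (t.drop m) rfl
        rw [← hrec]
        apply List.map_congr_left
        intro j hj
        have hj0 : 0 ≤ j := by
          have := (PySem.List.mem_pyRange_iff_of_pos hs j).mp hj
          omega
        simp only [Function.comp]
        obtain ⟨jn, rfl⟩ : ∃ jn : Nat, (jn : Int) = j := ⟨j.toNat, by omega⟩
        have h1 : (jn : Int) + (0 + ((m : Int) + 1)) = ((jn + (m + 1) : Nat) : Int) := by
          push_cast; ring
        have h2 : ((jn + (m + 1) : Nat) : Int) + ((m : Int) + 1)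
            = ((jn + (m + 1) : Nat) : Int) + ((m + 1 : Nat) : Int) := by push_cast; ring
        rw [h1, h2, PySem.List.slice_natCast_add]
        have h3 : ((m : Int) + 1) = ((m + 1 : Nat) : Int) := by push_cast; ring
        rw [h3, PySem.List.slice_natCast_add]
        congr 2
        rw [List.drop_drop]
        have : jn + (m + 1) = (jn + m) + 1 := by omega
        rw [this, List.drop_succ_cons]
        congr 1
        omega
      · have ht : t.drop m = [] := by
          rw [List.drop_eq_nil_iff]; omega
        have hnil : PySem.List.pyRange (0 + ((m : Int) + 1)) ((c :: t).length : Int) ((m : Int) + 1) = [] := by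
          apply pv_pyRange_nil _ _ _ hs
          simp only [List.length_cons]
          push_cast
          omega
        rw [hnil, ht, pvChunks_nil]
        simp

-- A's reverse-Horner accumulation of one chunk equals pvVal.
theorem pv_rev_horner (l : List Char) :
    l.reverse.foldl (fun r c => r * 256 + (c.toNat : Int)) 0 = pvVal l := by
  induction l with
  | nil => rfl
  | cons a t ih =>
    rw [List.reverse_cons, List.foldl_append, pvVal_cons, ih]
    simp [pvVal]; ring

-- A's append-accumulator over the chunk list is the map of per-chunk values.
theorem pv_foldl_shape (chunks : List (List Char)) :
    (chunks.foldl
      (fun (st : List Int × Int) chunk =>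
        let result := chunk.reverse.foldl (fun r c => r * 256 + (c.toNat : Int)) st.2
        (st.1 ++ [result], 0))
      ([], 0)).1
      = chunks.map (fun chunk => chunk.reverse.foldl (fun r c => r * 256 + (c.toNat : Int)) 0) := by
  suffices h : ∀ (acc : List Int),
      (chunks.foldl
        (fun (st : List Int × Int) chunk =>
          let result := chunk.reverse.foldl (fun r c => r * 256 + (c.toNat : Int)) st.2
          (st.1 ++ [result], 0))
        (acc, 0)).1
        = acc ++ chunks.map (fun chunk => chunk.reverse.foldl (fun r c => r * 256 + (c.toNat : Int)) 0) by
    simpa using h []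
  induction chunks with
  | nil => intro acc; simp
  | cons c t ih =>
    intro acc
    simp only [List.foldl_cons]
    rw [ih]
    simp

-- B's step function, abbreviated.
def pvStep (n : Int) (st : List Int × Int × Int) (c : Char) : List Int × Int × Int :=
  let acc := st.2.1 + ((c.toNat : Int) <<< ((8 * st.2.2).toNat))
  let k := st.2.2 + 1
  if k = n then (st.1 ++ [acc], (0 : Int), (0 : Int)) else (st.1, acc, k)

-- Running B's fold over a partial chunk (never reaching the flush).
theorem pvB_part (n : Int) (l : List Char) :
    ∀ (out : List Int) (acc k : Int), 0 ≤ k → k + l.length < n →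
    l.foldl (pvStep n) (out, acc, k) = (out, acc + 256 ^ k.toNat * pvVal l, k + l.length) := by
  induction l with
  | nil => intro out acc k _ _; simp [pvVal_nil]
  | cons c t ih =>
    intro out acc k hk hlt
    simp only [List.foldl_cons]
    have hne : k + 1 ≠ n := by simp at hlt; omega
    simp only [pvStep, if_neg hne]
    rw [ih _ _ _ (by omega) (by simp at hlt; omega)]
    have hsh : ((c.toNat : Int) <<< ((8 * k).toNat)) = (c.toNat : Int) * 256 ^ k.toNat := by
      rw [Int.shiftLeft_eq]
      have : (8 * k).toNat = 8 * k.toNat := by omega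
      rw [this, pow_mul]; norm_num
    have hpow : (256 : Int) ^ (k + 1).toNat = 256 ^ k.toNat * 256 := by
      have : (k + 1).toNat = k.toNat + 1 := by omega
      rw [this, pow_succ]
    simp only [Prod.mk.injEq, List.length_cons, pvVal_cons]
    refine ⟨trivial, ?_, ?_⟩
    · rw [hsh, hpow]; ring
    · push_cast; ring

-- Running B's fold over one complete chunk (flushing at the end).
theorem pvB_full (n : Int) (l : List Char) :
    ∀ (out : List Int) (acc k : Int), 0 ≤ k → 1 ≤ l.length → k + l.length = n →
    l.foldl (pvStep n) (out, acc, k) = (out ++ [acc + 256 ^ k.toNat * pvVal l], 0, 0) := by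
  induction l with
  | nil => intro _ _ _ _ h _; simp at h
  | cons c t ih =>
    intro out acc k hk _ heq
    simp only [List.foldl_cons]
    have hsh : ((c.toNat : Int) <<< ((8 * k).toNat)) = (c.toNat : Int) * 256 ^ k.toNat := by
      rw [Int.shiftLeft_eq]
      have : (8 * k).toNat = 8 * k.toNat := by omega
      rw [this, pow_mul]; norm_num
    cases t with
    | nil =>
      have hn : k + 1 = n := by simp at heq; omega
      simp only [pvStep, if_pos hn, List.foldl_nil]
      have key : acc + (c.toNat : Int) <<< ((8 * k).toNat)
          = acc + 256 ^ k.toNat * pvVal [c] := by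
        rw [pvVal_cons, pvVal_nil, hsh]; ring
      rw [key]
    | cons d t' =>
      have hne : k + 1 ≠ n := by simp at heq; omega
      simp only [pvStep, if_neg hne]
      rw [ih _ _ _ (by omega) (by simp) (by simp only [List.length_cons] at heq ⊢; push_cast at heq ⊢; omega)]
      have hpow : (256 : Int) ^ (k + 1).toNat = 256 ^ k.toNat * 256 := by
        have : (k + 1).toNat = k.toNat + 1 := by omega
        rw [this, pow_succ]
      have key : acc + (c.toNat : Int) <<< ((8 * k).toNat) + 256 ^ (k + 1).toNat * pvVal (d :: t')
          = acc + 256 ^ k.toNat * pvVal (c :: d :: t') := by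
        simp only [pvVal_cons]; rw [hsh, hpow]; ring
      rw [key]

-- B's flat pass (fold + trailing flush) computes pvChunks, chunk size n = m+1.
def pvFinish (st : List Int × Int × Int) : List Int :=
  if st.2.2 ≠ 0 then st.1 ++ [st.2.1] else st.1

theorem pvB_chunks (m L : Nat) (l : List Char) (hl : l.length = L) :
    ∀ (out : List Int),
    pvFinish (l.foldl (pvStep ((m : Int) + 1)) (out, 0, 0)) = out ++ pvChunks m l := by
  induction L using Nat.strong_induction_on generalizing l with
  | _ L IH =>
    cases l with
    | nil => intro out; simp [pvFinish, pvChunks_nil]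
    | cons c t =>
      intro out
      have hL : t.length + 1 = L := by simpa using hl
      by_cases hm : m ≤ t.length
      · -- a full chunk of size m+1 is available
        have hsplit : c :: t = (c :: t.take m) ++ t.drop m := by
          simp [List.take_append_drop]
        conv_lhs => rw [hsplit]
        rw [List.foldl_append,
          pvB_full ((m : Int) + 1) (c :: t.take m) out 0 0 (by omega)
            (by simp) (by simp only [List.length_cons, List.length_take]; push_cast; omega)]
        simp only [Int.toNat_zero, pow_zero, one_mul, zero_add]
        have hrec := IH (t.drop m).length (by simp only [List.length_drop]; omega) (t.drop m) rfl
          (out ++ [pvVal (c :: t.take m)])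
        rw [hrec, pvChunks_cons, List.append_assoc]
        rfl
      · -- the string ends inside the first chunk
        rw [pvB_part ((m : Int) + 1) (c :: t) out 0 0 (by omega)
            (by simp only [List.length_cons]; push_cast; omega)]
        have ht : t.drop m = [] := by rw [List.drop_eq_nil_iff]; omega
        have htk : t.take m = t := by rw [List.take_of_length_le]; omega
        simp only [pow_zero, Int.toNat_zero, one_mul, zero_add, pvFinish]
        rw [if_pos (by simp only [List.length_cons]; push_cast; omega)]
        rw [pvChunks_cons, ht, htk, pvChunks_nil]

-- ===== VERDICT (by name: the statement is the Claim_ definition above) =====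
theorem base64_to_int_chunk_spec : Claim_equal_base64_to_int_chunk := by
  intro s n _ hn
  unfold Spec_base64_to_int_chunk base64_to_int_chunk base64_to_int_chunk_alt
  by_cases hneg : n ≤ 0
  · -- n < 0 (n = 0 excluded): range(0, len, n) is empty in A, B returns [] directly
    rw [if_pos hneg]
    have : PySem.List.pyRange 0 (PySem.Str.len s) n = [] := by
      rw [PySem.List.pyRange]
      have h0 : ¬ n = 0 := hn
      rw [if_neg h0]
      have h1 : ¬ 0 < n := by omega
      have h2 : ¬ PySem.Str.len s < 0 := by
        simp [PySem.Str.len]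
      simp [if_neg h1]
    rw [this]
    simp
  · -- n ≥ 1
    rw [if_neg hneg]
    have hn1 : 1 ≤ n := by omega
    set m : Nat := n.toNat - 1 with hm
    have hmn : ((m : Int) + 1) = n := by omega
    simp only [pv_foldl_shape, List.map_map]
    have hA : ((PySem.List.pyRange 0 (PySem.Str.len s) n).map
        ((fun chunk => chunk.reverse.foldl (fun r c => r * 256 + (c.toNat : Int)) 0) ∘
          fun i => PySem.List.slice s.toList (some i) (some (i + n))))
        = pvChunks m s.toList := by
      rw [← pvA_chunks m s.toList.length s.toList rfl]
      have hlen : PySem.Str.len s = (s.toList.length : Int) := by simp [PySem.Str.len]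
      rw [hlen, hmn]
      exact List.map_congr_left (fun j _ => by
        simp only [Function.comp]
        rw [pv_rev_horner])
    rw [hA]
    have hB := pvB_chunks m s.toList.length s.toList rfl []
    rw [hmn] at hB
    simp only [List.nil_append] at hB
    exact hB.symm
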